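-- pv_equiv track=rewrite | github.com/lamalgopach/Advent_of_Code_2021 | 12.py | can_go_to_small_cave
-- ===== SOURCE A (Python) =====
-- def can_go_to_small_cave(prefix):
-- 	caves = set()
-- 	for c in prefix:
-- 		if c.islower():
-- 			if c in caves:
-- 				return False
-- 			else:
-- 				caves.add(c)
-- 	return True
-- ===== SOURCE B (Python) =====
-- def can_go_to_small_cave(prefix):
--     smalls = sorted(c for c in prefix if c.islower())
--     return all(a != b for a, b in zip(smalls, smalls[1:]))
-- ===== Notes on version B (the rewrite author's own statement) =====
-- stated objective: alternative
-- what changed: Replaces A's incremental hash-set membership loop with early return by a sort-then-scan algorithm: sort the lowercase caves and check that no two adjacent sorted elements are equal (duplicates are adjacent after sorting).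
import Mathlib
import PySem

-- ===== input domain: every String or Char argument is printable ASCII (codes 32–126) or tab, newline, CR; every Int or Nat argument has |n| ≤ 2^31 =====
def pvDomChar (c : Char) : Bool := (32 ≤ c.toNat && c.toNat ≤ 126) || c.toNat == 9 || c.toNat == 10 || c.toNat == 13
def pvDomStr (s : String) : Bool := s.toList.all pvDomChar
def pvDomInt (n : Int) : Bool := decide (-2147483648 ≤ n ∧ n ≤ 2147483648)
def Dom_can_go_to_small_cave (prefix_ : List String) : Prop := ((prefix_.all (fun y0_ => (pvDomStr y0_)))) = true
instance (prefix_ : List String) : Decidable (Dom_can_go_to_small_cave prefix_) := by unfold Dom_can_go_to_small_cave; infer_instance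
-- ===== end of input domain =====

-- B replaces A's incremental dedup-set loop with early return by a sort-then-adjacent-scan
-- algorithm (sort the lowercase caves; duplicates become adjacent); objective: alternative.

-- str.islower(), ported by hand (PySem has only the per-char predicates): on the ASCII
-- domain the cased characters are exactly the letters, so s.islower() is "some letter
-- occurs and no uppercase letter occurs" — exact on Dom_can_go_to_small_cave.
def pvStrIslower (s : String) : Bool :=
  s.toList.any PySem.Chars.isalpha && s.toList.all (fun c => !PySem.Chars.isupper c)

-- ===== PORT A =====
def canGoLoopA : List String → PySem.Set String → Bool
  | [], _ => true
  | c :: rest, caves =>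
    if pvStrIslower c then
      if PySem.Set.contains caves c then false
      else canGoLoopA rest (PySem.Set.add caves c)
    else canGoLoopA rest caves

def can_go_to_small_cave (prefix_ : List String) : Bool :=
  canGoLoopA prefix_ PySem.Set.empty

-- ===== PORT B =====
-- smalls[1:] on a list is List.drop 1 (exact for a nonnegative in-range start).
def can_go_to_small_cave_alt (prefix_ : List String) : Bool :=
  let smalls := PySem.List.sorted (prefix_.filter pvStrIslower) (fun x => x) false
  (smalls.zip (smalls.drop 1)).all (fun p => p.1 != p.2)

-- ===== PRECONDITION & SPEC =====
def Spec_can_go_to_small_cave (prefix_ : List String) (out : Bool) : Prop := out = can_go_to_small_cave_alt prefix_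
instance (prefix_ : List String) (out : Bool) : Decidable (Spec_can_go_to_small_cave prefix_ out) := by unfold Spec_can_go_to_small_cave; infer_instance

-- ===== CLAIM (what is proved, stated in full; the proofs are below) =====
def Claim_equal_can_go_to_small_cave : Prop := ∀ (prefix_ : List String), Dom_can_go_to_small_cave prefix_ → Spec_can_go_to_small_cave prefix_ (can_go_to_small_cave prefix_)

-- ===== LEMMAS AND PROOFS =====

-- Invariant of A's loop: it succeeds iff the lowercase caves of the rest are pairwise
-- distinct and none of them is already in the accumulated set.
theorem loopA_iff (xs : List String) (s : PySem.Set String) :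
    canGoLoopA xs s = true ↔
      (xs.filter pvStrIslower).Nodup ∧ ∀ c ∈ xs.filter pvStrIslower, c ∉ s := by
  induction xs generalizing s with
  | nil => simp [canGoLoopA]
  | cons x xs ih =>
    by_cases hx : pvStrIslower x
    · simp only [canGoLoopA, hx, if_true, List.filter_cons_of_pos hx]
      by_cases hc : PySem.Set.contains s x
      · have hmem : x ∈ s := (PySem.Set.contains_iff s x).mp hc
        rw [if_pos hc]
        simp only [Bool.false_eq_true, false_iff, not_and]
        intro _ hall
        exact (hall x (List.mem_cons_self ..)) hmem
      · have hnm : x ∉ s := fun h => hc ((PySem.Set.contains_iff s x).mpr h)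
        rw [if_neg hc, ih, List.nodup_cons, List.forall_mem_cons]
        constructor
        · rintro ⟨hn, hall⟩
          exact ⟨⟨fun h => (hall x h) ((PySem.Set.mem_add s x x).mpr (Or.inr rfl)), hn⟩,
            hnm, fun c h hcs => (hall c h) ((PySem.Set.mem_add s x c).mpr (Or.inl hcs))⟩
        · rintro ⟨⟨hxn, hn⟩, -, hall⟩
          refine ⟨hn, fun c h hm => ?_⟩
          rcases (PySem.Set.mem_add s x c).mp hm with hcs | rfl
          · exact hall c h hcs
          · exact hxn h
    · simp only [canGoLoopA, hx, Bool.false_eq_true, if_false, List.filter_cons_of_neg hx]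
      exact ih s

-- On a ≤-sorted list, "no two adjacent elements equal" is exactly Nodup.
theorem adj_ne_iff_nodup (l : List String) (hs : l.Pairwise (· ≤ ·)) :
    ((l.zip (l.drop 1)).all (fun p => p.1 != p.2) = true) ↔ l.Nodup := by
  induction l with
  | nil => simp
  | cons x t ih =>
    cases t with
    | nil => simp
    | cons y r =>
      have hxy : x ≤ y := (List.pairwise_cons.mp hs).1 y (List.mem_cons_self ..)
      have hyr : ∀ z ∈ r, y ≤ z := fun z hz =>
        (List.pairwise_cons.mp ((List.pairwise_cons.mp hs).2)).1 z hz
      have ih' := ih (List.pairwise_cons.mp hs).2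
      simp only [List.drop_one, List.tail_cons, List.zip_cons_cons, List.all_cons,
        Bool.and_eq_true, bne_iff_ne, ne_eq] at ih' ⊢
      constructor
      · rintro ⟨hne, hrest⟩
        refine List.nodup_cons.mpr ⟨?_, ih'.mp hrest⟩
        intro hmem
        rcases List.mem_cons.mp hmem with rfl | hmr
        · exact hne rfl
        · exact hne (le_antisymm hxy (hyr x hmr))
      · intro hnd
        rcases List.nodup_cons.mp hnd with ⟨hxnot, hnd'⟩
        exact ⟨fun h => by subst h; exact hxnot (List.mem_cons_self ..), ih'.mpr hnd'⟩

-- ===== VERDICT (by name: the statement is the Claim_ definition above) =====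
theorem can_go_to_small_cave_spec : Claim_equal_can_go_to_small_cave := by
  intro prefix_ _
  unfold Spec_can_go_to_small_cave can_go_to_small_cave can_go_to_small_cave_alt
  rw [Bool.eq_iff_iff, loopA_iff]
  have hperm := PySem.List.sorted_perm (prefix_.filter pvStrIslower) (fun x => x) false
  rw [adj_ne_iff_nodup _ (PySem.List.sorted_pairwise (prefix_.filter pvStrIslower) (fun x => x)),
    hperm.nodup_iff]
  simp [PySem.Set.empty]
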